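-- pv_equiv track=rewrite | github.com/kylhuk/BuildAtlasv2 | backend/engine/surrogate/model.py | _build_token_vocab
-- ===== SOURCE A (Python) =====
-- from typing import Any, Callable, Iterable, Mapping, Sequence
--
-- def _build_token_vocab(
--     rows: Sequence[Mapping[str, Any]],
--     field: str,
-- ) -> tuple[dict[str, int], list[list[int]]]:
--     vocab: dict[str, int] = {}
--     row_indices: list[list[int]] = []
--     for row in rows:
--         indices: list[int] = []
--         for token in _token_sequence(row.get(field)):
--             index = vocab.get(token)
--             if index is None:
--                 index = len(vocab)
--                 vocab[token] = index
--             indices.append(index)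
--         row_indices.append(indices)
--     return vocab, row_indices
--
-- def _token_sequence(value: Any) -> list[str]:
--     if not isinstance(value, Sequence) or isinstance(value, (str, bytes)):
--         return []
--     return [str(entry) for entry in value if entry is not None]
-- ===== SOURCE B (Python) =====
-- from typing import Any, Mapping, Sequence
--
-- def _build_token_vocab(
--     rows: Sequence[Mapping[str, Any]],
--     field: str,
-- ) -> tuple[dict[str, int], list[list[int]]]:
--     # Two-pass decomposition: first build the vocabulary in first-appearance
--     # order, then emit the per-row index lists by pure lookup.
--     vocab: dict[str, int] = {}
--     for row in rows:
--         for token in _token_sequence(row.get(field)):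
--             vocab.setdefault(token, len(vocab))
--     row_indices = [[vocab[token] for token in _token_sequence(row.get(field))]
--                    for row in rows]
--     return vocab, row_indices
--
-- def _token_sequence(value: Any) -> list[str]:
--     if not isinstance(value, Sequence) or isinstance(value, (str, bytes)):
--         return []
--     return [str(entry) for entry in value if entry is not None]
-- ===== Notes on version B (the rewrite author's own statement) =====
-- stated objective: alternative
-- what changed: A's single fused pass interleaving vocab growth with index emission is split into two differently-shaped passes: one setdefault loop that only builds the vocabulary, then a comprehension that emits row indices by pure lookup in the finished vocab.
import Mathlib
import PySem

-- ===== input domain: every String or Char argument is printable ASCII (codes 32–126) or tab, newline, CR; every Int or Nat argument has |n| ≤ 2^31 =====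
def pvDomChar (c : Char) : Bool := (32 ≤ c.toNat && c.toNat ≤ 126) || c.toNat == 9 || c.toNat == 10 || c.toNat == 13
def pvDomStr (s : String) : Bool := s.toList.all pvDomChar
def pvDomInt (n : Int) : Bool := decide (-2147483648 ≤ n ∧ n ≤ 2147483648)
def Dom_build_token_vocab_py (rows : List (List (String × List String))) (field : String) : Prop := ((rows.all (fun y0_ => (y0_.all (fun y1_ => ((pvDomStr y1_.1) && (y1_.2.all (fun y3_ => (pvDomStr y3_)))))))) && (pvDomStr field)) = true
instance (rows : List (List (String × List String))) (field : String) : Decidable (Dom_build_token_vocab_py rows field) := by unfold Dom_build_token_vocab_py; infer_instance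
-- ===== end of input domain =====

-- B replaces A's single fused pass (grow vocab while emitting indices) with two passes:
-- build the vocabulary first, then emit row indices by pure lookup. Same results; objective: alternative decomposition.

-- ===== PORT A =====
-- _token_sequence(row.get(field)): value is None or a list of strings; str(entry) on a string is the string
-- itself and entries are never None, so the comprehension returns the list unchanged (exact on the typed domain).
def tokenSequence (value : Option (List String)) : List String :=
  match value with
  | none => []
  | some xs => xs

-- shared by both Pythons: _token_sequence(row.get(field))
def rowTokens (row : List (String × List String)) (field : String) : List String :=
  tokenSequence ((PySem.Dict.mk row).get? field)

-- inner loop body of A: one token, state (vocab, indices)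
def buildStepTok (st : PySem.Dict String Int × List Int) (token : String) :
    PySem.Dict String Int × List Int :=
  match PySem.Dict.get? st.1 token with
  | some index => (st.1, st.2 ++ [index])
  | none => (st.1.insert token (st.1.size : Int), st.2 ++ [(st.1.size : Int)])

-- outer loop body of A: one row, state (vocab, row_indices)
def buildStepRow (field : String) (st : PySem.Dict String Int × List (List Int))
    (row : List (String × List String)) : PySem.Dict String Int × List (List Int) :=
  let inner := (rowTokens row field).foldl buildStepTok (st.1, [])
  (inner.1, st.2 ++ [inner.2])

def build_token_vocab_py (rows : List (List (String × List String))) (field : String) :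
    (List (String × Int)) × List (List Int) :=
  let st := rows.foldl (buildStepRow field) (PySem.Dict.empty, [])
  (st.1.items, st.2)

-- ===== PORT B =====
-- vocab.setdefault(token, len(vocab))
def vocabAdd (v : PySem.Dict String Int) (t : String) : PySem.Dict String Int :=
  v.setdefault t (v.size : Int)

-- pass 1 of B: the vocabulary alone
def vocabOfRows (rows : List (List (String × List String))) (field : String) :
    PySem.Dict String Int :=
  rows.foldl (fun v row => (rowTokens row field).foldl vocabAdd v) PySem.Dict.empty

def build_token_vocab_py_alt (rows : List (List (String × List String))) (field : String) :
    (List (String × Int)) × List (List Int) :=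
  let vocab := vocabOfRows rows field
  -- pass 2: vocab[token]; the key is always present (pass 1 saw every token), so getD 0 is exact
  (vocab.items,
   rows.map (fun row => (rowTokens row field).map (fun t => (vocab.get? t).getD 0)))

-- ===== PRECONDITION & SPEC =====
def Spec_build_token_vocab_py (rows : List (List (String × List String))) (field : String) (out : (List (String × Int)) × List (List Int)) : Prop := out = build_token_vocab_py_alt rows field
instance (rows : List (List (String × List String))) (field : String) (out : (List (String × Int)) × List (List Int)) : Decidable (Spec_build_token_vocab_py rows field out) := by unfold Spec_build_token_vocab_py; infer_instance

-- ===== CLAIM (what is proved, stated in full; the proofs are below) =====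
def Claim_equal_build_token_vocab_py : Prop := ∀ (rows : List (List (String × List String))) (field : String), Dom_build_token_vocab_py rows field → Spec_build_token_vocab_py rows field (build_token_vocab_py rows field)

-- ===== LEMMAS AND PROOFS =====

-- vocabAdd never disturbs an existing binding
theorem get?_vocabAdd_of_some {v : PySem.Dict String Int} {t : String} {i : Int}
    (u : String) (h : v.get? t = some i) : (vocabAdd v u).get? t = some i := by
  unfold vocabAdd
  by_cases hc : v.contains u = true
  · rw [PySem.Dict.setdefault_of_contains _ _ hc]; exact h
  · rw [PySem.Dict.setdefault_of_not_contains _ _ (by simpa using hc)]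
    have hne : t ≠ u := by
      intro e; subst e
      rw [PySem.Dict.contains_eq_isSome_get?, h] at hc; simp at hc
    rw [PySem.Dict.get?_insert_of_ne _ _ hne]; exact h

theorem get?_foldl_vocabAdd_of_some (ts : List String) :
    ∀ (v : PySem.Dict String Int) {t : String} {i : Int}, v.get? t = some i →
      (ts.foldl vocabAdd v).get? t = some i := by
  induction ts with
  | nil => intro v t i h; simpa using h
  | cons u ts ih => intro v t i h; exact ih _ (get?_vocabAdd_of_some u h)

theorem get?_foldl_rows_of_some (field : String) (rows : List (List (String × List String))) :
    ∀ (v : PySem.Dict String Int) {t : String} {i : Int}, v.get? t = some i →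
      (rows.foldl (fun v row => (rowTokens row field).foldl vocabAdd v) v).get? t = some i := by
  induction rows with
  | nil => intro v t i h; simpa using h
  | cons r rs ih => intro v t i h; exact ih _ (get?_foldl_vocabAdd_of_some _ _ h)

-- the index A emits for one token, as a lookup in the vocab right after adding it
def emit (v : PySem.Dict String Int) : List String → List Int
  | [] => []
  | t :: ts => ((vocabAdd v t).get? t).getD 0 :: emit (vocabAdd v t) ts

theorem buildStepTok_eq (v : PySem.Dict String Int) (idxs : List Int) (t : String) :
    buildStepTok (v, idxs) t = (vocabAdd v t, idxs ++ [((vocabAdd v t).get? t).getD 0]) := by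
  unfold buildStepTok vocabAdd
  cases h : v.get? t with
  | some i =>
      have hc : v.contains t = true := by
        rw [PySem.Dict.contains_eq_isSome_get?, h]; rfl
      simp [PySem.Dict.setdefault_of_contains _ _ hc, h]
  | none =>
      have hc : ¬ v.contains t = true := by
        rw [PySem.Dict.contains_eq_isSome_get?, h]; simp
      simp [PySem.Dict.setdefault_of_not_contains _ _ (by simpa using hc),
            PySem.Dict.get?_insert_self]

theorem foldl_buildStepTok (ts : List String) :
    ∀ (v : PySem.Dict String Int) (idxs : List Int),
      ts.foldl buildStepTok (v, idxs) = (ts.foldl vocabAdd v, idxs ++ emit v ts) := by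
  induction ts with
  | nil => intro v idxs; simp [emit]
  | cons t ts ih =>
      intro v idxs
      simp only [List.foldl_cons, buildStepTok_eq, emit, ih, List.append_assoc,
        List.singleton_append]

-- if every binding of the row-final vocab survives into V, emit is a pure lookup in V
theorem emit_eq (V : PySem.Dict String Int) (ts : List String) :
    ∀ (v : PySem.Dict String Int),
      (∀ t i, (ts.foldl vocabAdd v).get? t = some i → V.get? t = some i) →
      emit v ts = ts.map (fun t => (V.get? t).getD 0) := by
  induction ts with
  | nil => intro v _; simp [emit]
  | cons t ts ih =>
      intro v hV
      have hsome : (vocabAdd v t).get? t = some ((v.get? t).getD (v.size : Int)) :=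
        PySem.Dict.get?_setdefault_self _ _ _
      have hVt : V.get? t = some ((v.get? t).getD (v.size : Int)) :=
        hV t _ (get?_foldl_vocabAdd_of_some ts _ hsome)
      simp only [emit, List.map_cons, hsome, hVt]
      exact congrArg _ (ih _ (fun t' i h => hV t' i (by simpa using h)))

def emitRows (field : String) (v : PySem.Dict String Int) :
    List (List (String × List String)) → List (List Int)
  | [] => []
  | r :: rs => emit v (rowTokens r field) ::
      emitRows field ((rowTokens r field).foldl vocabAdd v) rs

theorem foldl_buildStepRow (field : String) (rows : List (List (String × List String))) :
    ∀ (v : PySem.Dict String Int) (acc : List (List Int)),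
      rows.foldl (buildStepRow field) (v, acc) =
        (rows.foldl (fun v row => (rowTokens row field).foldl vocabAdd v) v,
         acc ++ emitRows field v rows) := by
  induction rows with
  | nil => intro v acc; simp [emitRows]
  | cons r rs ih =>
      intro v acc
      simp only [List.foldl_cons, buildStepRow, foldl_buildStepTok, emitRows, ih,
        List.append_assoc, List.singleton_append, List.nil_append]

theorem emitRows_eq (field : String) (V : PySem.Dict String Int)
    (rows : List (List (String × List String))) :
    ∀ (v : PySem.Dict String Int),
      (∀ t i, (rows.foldl (fun v row => (rowTokens row field).foldl vocabAdd v) v).get? t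
          = some i → V.get? t = some i) →
      emitRows field v rows =
        rows.map (fun row => (rowTokens row field).map (fun t => (V.get? t).getD 0)) := by
  induction rows with
  | nil => intro v _; simp [emitRows]
  | cons r rs ih =>
      intro v hV
      simp only [emitRows, List.map_cons]
      refine congrArg₂ _ ?_ (ih _ (fun t i h => hV t i (by simpa using h)))
      exact emit_eq V _ _ (fun t i h =>
        hV t i (by simpa using get?_foldl_rows_of_some field rs _ h))

-- ===== VERDICT (by name: the statement is the Claim_ definition above) =====
theorem build_token_vocab_py_spec : Claim_equal_build_token_vocab_py := by
  intro rows field _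
  unfold Spec_build_token_vocab_py build_token_vocab_py build_token_vocab_py_alt vocabOfRows
  rw [foldl_buildStepRow]
  simp only [List.nil_append]
  rw [emitRows_eq field _ rows PySem.Dict.empty (fun t i h => h)]
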